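-- pv_equiv track=rewrite | github.com/JorgeCMurillo/GPT_Prototype | moonshotGPT/plot_step_metrics.py | detect_reductions
-- ===== SOURCE A (Python) =====
-- from typing import Dict, Iterable, List, Tuple
--
-- def detect_reductions(ewok_records: Iterable[Dict]) -> List[str]:
--     seen_sum = False
--     seen_mean = False
--     for r in ewok_records:
--         if "eval_official" in r or "eval_official_sum" in r:
--             seen_sum = True
--         if "eval_official_mean" in r:
--             seen_mean = True
--     out = []
--     if seen_sum:
--         out.append("sum")
--     if seen_mean:
--         out.append("mean")
--     return out
-- ===== SOURCE B (Python) =====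
-- from typing import Dict, Iterable, List
--
-- # Table mapping each reduction name to the record keys that trigger it,
-- # in output order.
-- REDUCTION_TRIGGERS = (
--     ("sum", ("eval_official", "eval_official_sum")),
--     ("mean", ("eval_official_mean",)),
-- )
--
-- def detect_reductions(ewok_records: Iterable[Dict]) -> List[str]:
--     records = list(ewok_records)
--     return [name for name, keys in REDUCTION_TRIGGERS
--             if any(k in r for r in records for k in keys)]
-- ===== Notes on version B (the rewrite author's own statement) =====
-- stated objective: simpler
-- what changed: Replaces A's single flag-maintaining loop with a table-driven comprehension: a constant table maps each reduction name to its trigger keys, and the output is built by one short-circuiting any() query over the (materialized) records per table entry, so the boolean-flag state machine disappears.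
import Mathlib
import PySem

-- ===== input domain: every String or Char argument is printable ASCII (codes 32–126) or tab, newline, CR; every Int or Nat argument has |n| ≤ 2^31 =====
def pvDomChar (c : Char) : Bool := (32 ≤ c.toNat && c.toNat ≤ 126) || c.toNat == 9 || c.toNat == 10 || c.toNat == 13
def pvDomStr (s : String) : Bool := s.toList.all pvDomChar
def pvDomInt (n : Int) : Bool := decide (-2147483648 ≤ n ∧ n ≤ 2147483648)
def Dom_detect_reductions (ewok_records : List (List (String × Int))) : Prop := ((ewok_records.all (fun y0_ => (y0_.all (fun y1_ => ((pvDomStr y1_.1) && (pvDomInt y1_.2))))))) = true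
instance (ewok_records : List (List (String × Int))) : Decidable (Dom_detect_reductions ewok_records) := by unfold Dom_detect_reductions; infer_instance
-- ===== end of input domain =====

-- B replaces A's flag-maintaining loop with a table-driven comprehension (one any() query per reduction); same cost, simpler.

-- ===== PORT A =====
-- per-record loop maintaining the two flags, then the conditional appends
def detect_reductions (ewok_records : List (List (String × Int))) : List String :=
  let st := ewok_records.foldl (fun (st : Bool × Bool) r =>
    let s := if r.any (fun p => p.1 == "eval_official") || r.any (fun p => p.1 == "eval_official_sum") then true else st.1
    let m := if r.any (fun p => p.1 == "eval_official_mean") then true else st.2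
    (s, m)) (false, false)
  (if st.1 then ["sum"] else []) ++ (if st.2 then ["mean"] else [])

-- ===== PORT B =====
-- constant trigger table, output order
def pvReductionTriggers : List (String × List String) :=
  [("sum", ["eval_official", "eval_official_sum"]), ("mean", ["eval_official_mean"])]

-- comprehension over the table: keep a name iff some record contains one of its trigger keys
def detect_reductions_alt (ewok_records : List (List (String × Int))) : List String :=
  (pvReductionTriggers.filter (fun nk =>
    ewok_records.any (fun r => nk.2.any (fun k => r.any (fun p => p.1 == k))))).map Prod.fst

-- ===== PRECONDITION & SPEC =====
def Spec_detect_reductions (ewok_records : List (List (String × Int))) (out : List String) : Prop := out = detect_reductions_alt ewok_records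
instance (ewok_records : List (List (String × Int))) (out : List String) : Decidable (Spec_detect_reductions ewok_records out) := by unfold Spec_detect_reductions; infer_instance

-- ===== CLAIM (what is proved, stated in full; the proofs are below) =====
def Claim_equal_detect_reductions : Prop := ∀ (ewok_records : List (List (String × Int))), Dom_detect_reductions ewok_records → Spec_detect_reductions ewok_records (detect_reductions ewok_records)

-- ===== LEMMAS AND PROOFS =====

-- A's flag fold computed componentwise
lemma flags_foldl (rs : List (List (String × Int))) (a b : Bool) :
    rs.foldl (fun (st : Bool × Bool) r =>
      let s := if r.any (fun p => p.1 == "eval_official") || r.any (fun p => p.1 == "eval_official_sum") then true else st.1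
      let m := if r.any (fun p => p.1 == "eval_official_mean") then true else st.2
      (s, m)) (a, b)
    = (a || rs.any (fun r => r.any (fun p => p.1 == "eval_official") || r.any (fun p => p.1 == "eval_official_sum")),
       b || rs.any (fun r => r.any (fun p => p.1 == "eval_official_mean"))) := by
  induction rs generalizing a b with
  | nil => simp
  | cons r rs ih =>
    simp only [List.foldl, List.any_cons, ih]
    simp only [Prod.mk.injEq]
    constructor <;> (split_ifs with h <;> simp [h])

-- ===== VERDICT (by name: the statement is the Claim_ definition above) =====
theorem detect_reductions_spec : Claim_equal_detect_reductions := by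
  intro rs hdom
  clear hdom
  unfold Spec_detect_reductions detect_reductions detect_reductions_alt pvReductionTriggers
  simp only [flags_foldl, Bool.false_or, List.filter_cons, List.filter_nil,
    List.any_cons, List.any_nil, Bool.or_false]
  split_ifs with h1 h2 h2 <;> simp_all
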